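-- pv_equiv track=rewrite | github.com/anonymous-user-02/FedMoSA | system/flcore/trainmodel/models.py | compute_pooling
-- ===== SOURCE A (Python) =====
-- from typing import List, Tuple, Dict, Callable
--
-- def compute_pooling(shape: List[int], min_feature_map_size: int = 8):
--     """
--     nnU-Net v2–style dynamic pooling:
--     Pool per axis independently until feature map becomes too small.
--     """
--     shape = list(shape)
--     pool_per_axis = [0] * len(shape)
--
--     while True:
--         can_pool = [s >= 2 * min_feature_map_size for s in shape]
--         if not any(can_pool):
--             break
--
--         for i in range(len(shape)):
--             if can_pool[i]:
--                 shape[i] //= 2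
--                 pool_per_axis[i] += 1
--
--     num_pool = max(pool_per_axis)
--     return num_pool, pool_per_axis
-- ===== SOURCE B (Python) =====
-- from typing import List, Tuple, Dict, Callable
--
-- def compute_pooling(shape: List[int], min_feature_map_size: int = 8):
--     """Closed-form per-axis pool count: halving s while s >= 2*min happens
--     exactly bit_length(s // (2*min)) times."""
--     two_min = 2 * min_feature_map_size
--     pool_per_axis = [max(s // two_min, 0).bit_length() for s in shape]
--     return max(pool_per_axis), pool_per_axis
-- ===== Notes on version B (the rewrite author's own statement) =====
-- stated objective: simpler
-- what changed: Replaces the round-based while-loop that repeatedly halves all axes in lockstep by a closed-form per-axis count bit_length(max(s // (2*min), 0)) computed in one list comprehension.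
-- outside the precondition, e.g. on compute_pooling([-1], 0): A returns (0, [0]), B raises ZeroDivisionError; on compute_pooling([-10], -2): A returns (0, [0]), B returns (2, [2])
import Mathlib
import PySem

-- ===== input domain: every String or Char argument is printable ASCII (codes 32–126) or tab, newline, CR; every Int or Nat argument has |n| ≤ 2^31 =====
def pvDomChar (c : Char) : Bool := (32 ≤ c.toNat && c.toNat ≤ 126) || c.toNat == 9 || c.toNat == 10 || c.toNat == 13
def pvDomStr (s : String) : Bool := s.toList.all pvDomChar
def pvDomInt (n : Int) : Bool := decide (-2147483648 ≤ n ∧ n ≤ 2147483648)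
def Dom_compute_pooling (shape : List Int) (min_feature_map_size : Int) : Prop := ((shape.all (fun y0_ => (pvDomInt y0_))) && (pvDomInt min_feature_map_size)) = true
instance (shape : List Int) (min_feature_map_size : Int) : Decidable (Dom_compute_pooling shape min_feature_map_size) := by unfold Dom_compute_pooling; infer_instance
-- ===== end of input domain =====

-- B replaces A's round-based halving loop by a closed-form per-axis count
-- bit_length(s // (2*min)); objective: simpler (and loop-free).

-- ===== PORT A =====
-- termination measure for A's `while True` loop (sum of the nonnegative parts)
def pvSumNat (xs : List Int) : Nat := (xs.map Int.toNat).sum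

-- one halving step of A's inner `for` loop over (shape, pool) pairs
def pvStep (m : Int) : Int × Int → Int × Int :=
  fun sp => if 2 * m ≤ sp.1 then (PySem.Int.floordiv sp.1 2, sp.2 + 1) else sp

-- the `while True:` loop of A; the `if h : _` guard only makes the recursion
-- total in Lean (for 1 ≤ min the measure always decreases, see pvSum_step_lt below)
def pvLoopA (m : Int) (shape pool : List Int) : List Int × List Int :=
  if shape.any (fun s => 2 * m ≤ s) then
    if h : pvSumNat (((shape.zip pool).map (pvStep m)).map Prod.fst) < pvSumNat shape then
      pvLoopA m (((shape.zip pool).map (pvStep m)).map Prod.fst)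
        (((shape.zip pool).map (pvStep m)).map Prod.snd)
    else (((shape.zip pool).map (pvStep m)).map Prod.fst,
        ((shape.zip pool).map (pvStep m)).map Prod.snd)
  else (shape, pool)
termination_by pvSumNat shape
decreasing_by exact h

def compute_pooling (shape : List Int) (min_feature_map_size : Int) : Int × List Int :=
  let res := pvLoopA min_feature_map_size shape (List.replicate shape.length 0)
  match PySem.List.max? res.2 (fun y => y) with   -- max(pool_per_axis)
  | some v => (v, res.2)
  | none => (0, res.2)   -- max([]) raises ValueError in Python; excluded by Pre_

-- ===== PORT B =====
def compute_pooling_alt (shape : List Int) (min_feature_map_size : Int) : Int × List Int :=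
  let two_min := 2 * min_feature_map_size
  let pool := shape.map
    (fun s => (PySem.Int.bitLength (max (PySem.Int.floordiv s two_min) 0) : Int))
  match PySem.List.max? pool (fun y => y) with
  | some v => (v, pool)
  | none => (0, pool)   -- max([]) raises ValueError in Python; excluded by Pre_

-- ===== PRECONDITION & SPEC =====
-- Pre_ excludes the empty shape (max([]) raises ValueError in both programs) and
-- min_feature_map_size ≤ 0, on which A loops forever for almost every shape and
-- B's natural closed form raises (min = 0) or gives the sensible count where A's
-- degenerate all-small inputs happen to return.
def Pre_compute_pooling (shape : List Int) (min_feature_map_size : Int) : Prop :=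
  shape ≠ [] ∧ 1 ≤ min_feature_map_size

instance (shape : List Int) (min_feature_map_size : Int) : Decidable (Pre_compute_pooling shape min_feature_map_size) := by unfold Pre_compute_pooling; infer_instance

def pvWitness_compute_pooling : List Int × Int := ([37, 8, 200], 8)

def Spec_compute_pooling (shape : List Int) (min_feature_map_size : Int) (out : Int × List Int) : Prop := out = compute_pooling_alt shape min_feature_map_size
instance (shape : List Int) (min_feature_map_size : Int) (out : Int × List Int) : Decidable (Spec_compute_pooling shape min_feature_map_size out) := by unfold Spec_compute_pooling; infer_instance

-- ===== CLAIM (what is proved, stated in full; the proofs are below) =====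
def Claim_equal_compute_pooling : Prop := ∀ (shape : List Int) (min_feature_map_size : Int), Dom_compute_pooling shape min_feature_map_size → Pre_compute_pooling shape min_feature_map_size → Spec_compute_pooling shape min_feature_map_size (compute_pooling shape min_feature_map_size)

-- ===== LEMMAS AND PROOFS =====

-- number of times A halves a single axis value s (guard 1 ≤ m makes it total)
def pvCount (m s : Int) : Int :=
  if h : 1 ≤ m ∧ 2 * m ≤ s then pvCount m (PySem.Int.floordiv s 2) + 1 else 0
termination_by s.toNat
decreasing_by
  rw [PySem.Int.floordiv_eq_ediv_of_pos (by omega)]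
  have h2 : (2 : Int) ≤ s := by omega
  have h1 : s / 2 < s := by
    rw [Int.ediv_lt_iff_lt_mul (by omega)]; omega
  have h0 : 0 ≤ s / 2 := Int.ediv_nonneg (by omega) (by omega)
  omega

lemma pvStep_fst_toNat_le (m : Int) (hm : 1 ≤ m) (sp : Int × Int) :
    ((pvStep m sp).1).toNat ≤ sp.1.toNat := by
  unfold pvStep
  split_ifs with h
  · rw [PySem.Int.floordiv_eq_ediv_of_pos (by omega)]
    have h1 : sp.1 / 2 ≤ sp.1 := Int.ediv_le_self _ (by omega)
    have h0 : 0 ≤ sp.1 / 2 := Int.ediv_nonneg (by omega) (by omega)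
    omega
  · exact le_rfl

lemma pvStep_fst_toNat_lt (m : Int) (hm : 1 ≤ m) (sp : Int × Int) (h : 2 * m ≤ sp.1) :
    ((pvStep m sp).1).toNat < sp.1.toNat := by
  unfold pvStep
  rw [if_pos h, PySem.Int.floordiv_eq_ediv_of_pos (by omega)]
  have h1 : sp.1 / 2 < sp.1 := by rw [Int.ediv_lt_iff_lt_mul (by omega)]; omega
  have h0 : 0 ≤ sp.1 / 2 := Int.ediv_nonneg (by omega) (by omega)
  omega

-- the measure strictly decreases over one round when some axis can pool
lemma pvSum_step_lt (m : Int) (hm : 1 ≤ m) :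
    ∀ (shape pool : List Int), shape.length = pool.length →
    shape.any (fun s => 2 * m ≤ s) = true →
    pvSumNat (((shape.zip pool).map (pvStep m)).map Prod.fst) < pvSumNat shape := by
  intro shape
  induction shape with
  | nil => intro pool _ hany; simp at hany
  | cons s t ih =>
    intro pool hlen hany
    cases pool with
    | nil => simp at hlen
    | cons p ps =>
      simp only [List.zip_cons_cons, List.map_cons, List.any_cons, Bool.or_eq_true,
        decide_eq_true_eq] at hany ⊢
      have hle : pvSumNat ((((t.zip ps)).map (pvStep m)).map Prod.fst) ≤ pvSumNat t := by
        clear hany ih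
        induction t generalizing ps with
        | nil => simp [pvSumNat]
        | cons s' t' ih' =>
          cases ps with
          | nil => simp at hlen
          | cons p' ps' =>
            simp only [List.zip_cons_cons, List.map_cons, pvSumNat, List.sum_cons]
            have := pvStep_fst_toNat_le m hm (s', p')
            have := ih' ps' (by simpa using hlen)
            simp only [pvSumNat] at this
            omega
      rcases hany with h | h
      · have := pvStep_fst_toNat_lt m hm (s, p) h
        simp only [pvSumNat, List.map_cons, List.sum_cons]
        simp only [pvSumNat] at hle
        omega
      · have hlt := ih ps (by simpa using hlen) (by simpa using h)
        have := pvStep_fst_toNat_le m hm (s, p)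
        simp only [pvSumNat, List.map_cons, List.sum_cons]
        simp only [pvSumNat] at hlt
        omega

-- A's loop computes, per axis, pool + pvCount
lemma counts_zero (m : Int) :
    ∀ (shape pool : List Int), shape.length = pool.length →
    (∀ s ∈ shape, ¬ 2 * m ≤ s) →
    (shape.zip pool).map (fun sp => sp.2 + pvCount m sp.1) = pool := by
  intro shape
  induction shape with
  | nil =>
    intro pool hlen _
    cases pool with
    | nil => rfl
    | cons => simp at hlen
  | cons s t ih =>
    intro pool hlen hno
    cases pool with
    | nil => simp at hlen
    | cons p ps =>
      simp only [List.zip_cons_cons, List.map_cons, List.cons.injEq]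
      refine ⟨?_, ih ps (by simpa using hlen) (fun x hx => hno x (by simp [hx]))⟩
      rw [pvCount, dif_neg (by intro hc; exact hno s (by simp) hc.2)]; ring

lemma pvLoopA_snd (m : Int) (hm : 1 ≤ m) :
    ∀ (n : Nat) (shape pool : List Int), pvSumNat shape ≤ n → shape.length = pool.length →
    (pvLoopA m shape pool).2 = (shape.zip pool).map (fun sp => sp.2 + pvCount m sp.1) := by
  intro n
  induction n with
  | zero =>
    intro shape pool hn hlen
    by_cases hany : shape.any (fun s => 2 * m ≤ s) = true
    · exact absurd (lt_of_lt_of_le (pvSum_step_lt m hm shape pool hlen hany) hn)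
        (Nat.not_lt_zero _)
    · rw [pvLoopA, if_neg hany]
      simp only [List.any_eq_true, decide_eq_true_eq, not_exists, not_and] at hany
      exact (counts_zero m shape pool hlen fun s hs => hany s hs).symm
  | succ k ih =>
    intro shape pool hn hlen
    by_cases hany : shape.any (fun s => 2 * m ≤ s) = true
    · have hlt := pvSum_step_lt m hm shape pool hlen hany
      rw [pvLoopA, if_pos hany, dif_pos hlt]
      have hlen2 : (((shape.zip pool).map (pvStep m)).map Prod.fst).length
          = (((shape.zip pool).map (pvStep m)).map Prod.snd).length := by simp
      rw [ih _ _ (by omega) hlen2]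
      rw [List.zip_map', List.map_map, List.map_map]
      apply List.map_congr_left
      intro sp _
      simp only [Function.comp]
      unfold pvStep
      split_ifs with h
      · simp only
        conv_rhs => rw [pvCount, dif_pos (And.intro hm h)]
        ring
      · rfl
    · rw [pvLoopA, if_neg hany]
      simp only [List.any_eq_true, decide_eq_true_eq, not_exists, not_and] at hany
      exact (counts_zero m shape pool hlen fun s hs => hany s hs).symm

-- the closed form: pvCount m s = bit_length(max(s // (2*m), 0))
lemma pvCount_eq_bitLength (m : Int) (hm : 1 ≤ m) :
    ∀ (s : Int), pvCount m s
      = (PySem.Int.bitLength (max (PySem.Int.floordiv s (2 * m)) 0) : Int) := by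
  have hpos : (0 : Int) < 2 * m := by omega
  intro s
  induction hk : s.toNat using Nat.strong_induction_on generalizing s with
  | _ k ih =>
    rw [pvCount]
    by_cases h : 2 * m ≤ s
    · have hq1 : 1 ≤ PySem.Int.floordiv s (2 * m) := by
        rw [PySem.Int.le_floordiv_iff_mul_le hpos]; omega
      have hs2 : (2 : Int) ≤ s := by omega
      have hrec : PySem.Int.floordiv (PySem.Int.floordiv s 2) (2 * m)
          = PySem.Int.floordiv (PySem.Int.floordiv s (2 * m)) 2 := by
        rw [PySem.Int.floordiv_eq_ediv_of_pos (b := (2:Int)) (by omega),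
            PySem.Int.floordiv_eq_ediv_of_pos hpos,
            PySem.Int.floordiv_eq_ediv_of_pos hpos,
            PySem.Int.floordiv_eq_ediv_of_pos (b := (2:Int)) (by omega),
            Int.ediv_ediv_of_nonneg (by omega : (0:Int) ≤ 2),
            Int.ediv_ediv_of_nonneg (by omega : (0:Int) ≤ 2 * m)]
        congr 1; ring
      have hlt : (PySem.Int.floordiv s 2).toNat < k := by
        rw [PySem.Int.floordiv_eq_ediv_of_pos (by omega)]
        have h1 : s / 2 < s := by rw [Int.ediv_lt_iff_lt_mul (by omega)]; omega
        have h0 : 0 ≤ s / 2 := Int.ediv_nonneg (by omega) (by omega)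
        omega
      have hq0 : 0 ≤ PySem.Int.floordiv (PySem.Int.floordiv s (2 * m)) 2 := by
        rw [PySem.Int.floordiv_eq_ediv_of_pos (by omega : (0:Int) < 2)]
        exact Int.ediv_nonneg (by omega) (by omega)
      rw [dif_pos (And.intro hm h), ih _ hlt _ rfl, hrec,
        max_eq_left hq0, max_eq_left (by omega : (0:Int) ≤ PySem.Int.floordiv s (2 * m))]
      conv_rhs => rw [PySem.Int.bitLength_of_pos (by omega : (0:Int) < PySem.Int.floordiv s (2 * m))]
      push_cast; ring
    · rw [dif_neg (by tauto)]
      have hq : PySem.Int.floordiv s (2 * m) < 1 := by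
        rw [PySem.Int.floordiv_lt_iff_lt_mul hpos]; omega
      rw [max_eq_right (by omega), PySem.Int.bitLength_zero]
      rfl

-- the two pool lists are equal
lemma pools_eq (shape : List Int) (m : Int) (hm : 1 ≤ m) :
    (pvLoopA m shape (List.replicate shape.length 0)).2
      = shape.map (fun s => (PySem.Int.bitLength (max (PySem.Int.floordiv s (2 * m)) 0) : Int)) := by
  rw [pvLoopA_snd m hm (pvSumNat shape) shape _ le_rfl (by simp)]
  induction shape with
  | nil => simp
  | cons s t ih =>
    simp only [List.length_cons, List.replicate_succ, List.zip_cons_cons, List.map_cons]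
    rw [List.cons.injEq]
    exact ⟨by rw [pvCount_eq_bitLength m hm s]; ring, ih⟩

-- ===== VERDICT (by name: the statement is the Claim_ definition above) =====
theorem compute_pooling_spec : Claim_equal_compute_pooling := by
  intro shape m _ hpre
  obtain ⟨hne, hm⟩ := hpre
  unfold Spec_compute_pooling
  simp only [compute_pooling, compute_pooling_alt, pools_eq shape m hm]
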